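-- pv_equiv track=rewrite | github.com/RaviSoni804426/Coding2 | online contest/mirror.py | count_dishes
-- ===== SOURCE A (Python) =====
-- def count_dishes(dishes):
--     total_carbs = 0
--     count = 0
--
--     for dish in dishes:
--         carbs = ord(dish)
--         total_carbs += carbs
--         count += 1
--
--         if total_carbs >= 270:
--             return count
--
--     if total_carbs < 270:
--         return -1
-- ===== SOURCE B (Python) =====
-- def count_dishes(dishes):
--     # Pass 1: materialize the prefix sums of the character codes (nondecreasing,
--     # since ord(c) >= 0). Pass 2: binary search for the first prefix sum >= 270.
--     prefix = []
--     s = 0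
--     for d in dishes:
--         s += ord(d)
--         prefix.append(s)
--     lo, hi = 0, len(prefix)
--     while lo < hi:
--         mid = (lo + hi) // 2
--         if prefix[mid] < 270:
--             lo = mid + 1
--         else:
--             hi = mid
--     return lo + 1 if lo < len(prefix) else -1
-- ===== Notes on version B (the rewrite author's own statement) =====
-- stated objective: alternative
-- what changed: A does a single accumulate-and-check loop with early return; B materializes the (nondecreasing) prefix-sum list of character codes and then binary-searches it for the first prefix sum >= 270.
import Mathlib
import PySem

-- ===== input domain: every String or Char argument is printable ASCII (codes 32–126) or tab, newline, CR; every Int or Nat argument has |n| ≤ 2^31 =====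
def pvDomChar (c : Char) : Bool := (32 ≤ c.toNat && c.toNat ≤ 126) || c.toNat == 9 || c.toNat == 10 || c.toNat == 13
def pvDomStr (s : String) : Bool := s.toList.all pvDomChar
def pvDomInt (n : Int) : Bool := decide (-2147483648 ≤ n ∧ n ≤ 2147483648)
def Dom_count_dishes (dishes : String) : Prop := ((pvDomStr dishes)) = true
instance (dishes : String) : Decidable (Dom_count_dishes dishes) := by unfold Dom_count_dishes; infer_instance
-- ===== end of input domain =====

-- B replaces A's accumulate-and-check loop by materializing the prefix-sum list and
-- binary-searching it for the first prefix sum ≥ 270 (objective: alternative).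

-- ===== PORT A =====
-- the for-loop of A: state (total_carbs, count)
def count_dishes_loop : List Char → Int → Int → Int
  | [], total, _ =>
      -- after the loop: 'if total_carbs < 270: return -1'; the else branch is
      -- unreachable in Python (the loop returned earlier), ported as -1 too
      if total < 270 then -1 else -1
  | d :: rest, total, count =>
      let carbs : Int := (d.toNat : Int)   -- ord(dish); exact on the ASCII domain
      let total := total + carbs
      let count := count + 1
      if total ≥ 270 then count else count_dishes_loop rest total count

def count_dishes (dishes : String) : Int := count_dishes_loop dishes.toList 0 0

-- ===== PORT B =====
-- pass 1 of Source B: the running-sum list 'prefix'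
def cdPrefix : List Char → Int → List Int
  | [], _ => []
  | d :: rest, s => (s + (d.toNat : Int)) :: cdPrefix rest (s + (d.toNat : Int))

-- the while-loop of Source B; 'prefix[mid]' is always in range (lo ≤ mid < hi ≤ len), exact via getD
def cdSearch (p : List Int) (lo hi : Nat) : Nat :=
  if lo < hi then
    let mid := (lo + hi) / 2
    if p.getD mid 0 < 270 then cdSearch p (mid + 1) hi else cdSearch p lo mid
  else lo
termination_by hi - lo
decreasing_by all_goals omega

def count_dishes_alt (dishes : String) : Int :=
  let p := cdPrefix dishes.toList 0
  let lo := cdSearch p 0 p.length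
  if lo < p.length then (lo : Int) + 1 else -1

-- ===== PRECONDITION & SPEC =====
def Spec_count_dishes (dishes : String) (out : Int) : Prop := out = count_dishes_alt dishes
instance (dishes : String) (out : Int) : Decidable (Spec_count_dishes dishes out) := by unfold Spec_count_dishes; infer_instance

-- ===== CLAIM (what is proved, stated in full; the proofs are below) =====
def Claim_equal_count_dishes : Prop := ∀ (dishes : String), Dom_count_dishes dishes → Spec_count_dishes dishes (count_dishes dishes)

-- ===== LEMMAS AND PROOFS =====

-- unfold equations for the binary-search loop
theorem cdSearch_step (p : List Int) (lo hi : Nat) (h : lo < hi) :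
    cdSearch p lo hi = if p.getD ((lo + hi) / 2) 0 < 270
      then cdSearch p ((lo + hi) / 2 + 1) hi else cdSearch p lo ((lo + hi) / 2) := by
  rw [cdSearch]; simp [h]

theorem cdSearch_base (p : List Int) (lo hi : Nat) (h : ¬ lo < hi) :
    cdSearch p lo hi = lo := by
  rw [cdSearch]; simp [h]

-- A's loop computed through the prefix-sum list: first index with entry ≥ 270
theorem count_dishes_loop_eq (l : List Char) (s c : Int) :
    count_dishes_loop l s c =
      (if (cdPrefix l s).findIdx (fun x => 270 ≤ x) < (cdPrefix l s).length
       then c + ((cdPrefix l s).findIdx (fun x => 270 ≤ x) : Int) + 1 else -1) := by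
  induction l generalizing s c with
  | nil => simp [count_dishes_loop, cdPrefix]
  | cons d rest ih =>
    by_cases h : (270 : Int) ≤ s + (d.toNat : Int)
    · simp [count_dishes_loop, cdPrefix, List.findIdx_cons, h, ge_iff_le]
    · have hstep : count_dishes_loop (d :: rest) s c
          = count_dishes_loop rest (s + (d.toNat : Int)) (c + 1) := by
        simp [count_dishes_loop, ge_iff_le, h]
      rw [hstep, ih]
      have hcons : (cdPrefix (d :: rest) s).findIdx (fun x => 270 ≤ x)
          = (cdPrefix rest (s + (d.toNat : Int))).findIdx (fun x => 270 ≤ x) + 1 := by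
        simp [cdPrefix, List.findIdx_cons, h]
      have hlen : (cdPrefix (d :: rest) s).length
          = (cdPrefix rest (s + (d.toNat : Int))).length + 1 := by
        simp [cdPrefix]
      rw [hcons, hlen]
      rcases lt_or_ge ((cdPrefix rest (s + (d.toNat : Int))).findIdx (fun x => 270 ≤ x))
          ((cdPrefix rest (s + (d.toNat : Int))).length) with hlt | hge
      · rw [if_pos hlt, if_pos (by omega)]; push_cast; ring
      · rw [if_neg (by omega), if_neg (by omega)]

-- every entry of the prefix-sum list is at least the starting sum
theorem cdPrefix_head_le (l : List Char) (s : Int) :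
    ∀ j : Nat, (hj : j < (cdPrefix l s).length) → s ≤ (cdPrefix l s)[j] := by
  induction l generalizing s with
  | nil => intro j hj; simp [cdPrefix] at hj
  | cons d rest ih =>
    intro j hj
    match j with
    | 0 =>
      simp only [cdPrefix, List.getElem_cons_zero]
      exact le_add_of_nonneg_right (Int.natCast_nonneg _)
    | Nat.succ j' =>
      simp only [cdPrefix, List.getElem_cons_succ]
      refine le_trans (le_add_of_nonneg_right (Int.natCast_nonneg d.toNat)) ?_
      exact ih (s + (d.toNat : Int)) j' (by simpa [cdPrefix] using hj)

-- prefix sums are monotone (character codes are nonnegative)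
theorem cdPrefix_mono (l : List Char) (s : Int) :
    ∀ i j : Nat, (hij : i ≤ j) → (hj : j < (cdPrefix l s).length) →
      (cdPrefix l s)[i]'(by omega) ≤ (cdPrefix l s)[j] := by
  induction l generalizing s with
  | nil => intro i j hij hj; simp [cdPrefix] at hj
  | cons d rest ih =>
    intro i j hij hj
    match i, j with
    | 0, 0 => exact le_rfl
    | 0, Nat.succ j' =>
      simp only [cdPrefix, List.getElem_cons_zero, List.getElem_cons_succ]
      exact cdPrefix_head_le rest (s + (d.toNat : Int)) j' (by simpa [cdPrefix] using hj)
    | Nat.succ i', Nat.succ j' =>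
      simp only [cdPrefix, List.getElem_cons_succ]
      exact ih (s + (d.toNat : Int)) i' j' (by omega) (by simpa [cdPrefix] using hj)

-- the binary search returns a "first crossing point" under the loop invariant
theorem cdSearch_spec (p : List Int)
    (hmono : ∀ i j : Nat, (hij : i ≤ j) → (hj : j < p.length) → p[i]'(by omega) ≤ p[j]) :
    ∀ n lo hi : Nat, hi - lo ≤ n → lo ≤ hi → hi ≤ p.length →
      (∀ j : Nat, (hj : j < p.length) → j < lo → p[j] < 270) →
      (∀ j : Nat, (hj : j < p.length) → hi ≤ j → 270 ≤ p[j]) →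
      lo ≤ cdSearch p lo hi ∧ cdSearch p lo hi ≤ hi ∧
        (∀ j : Nat, (hj : j < p.length) → j < cdSearch p lo hi → p[j] < 270) ∧
        ((h : cdSearch p lo hi < p.length) → 270 ≤ p[cdSearch p lo hi]) := by
  intro n
  induction n with
  | zero =>
    intro lo hi hfuel hlohi hhi hlo hhi2
    have hge : ¬ lo < hi := by omega
    rw [cdSearch_base p lo hi hge]
    exact ⟨le_rfl, by omega, hlo, fun h => hhi2 lo h (by omega)⟩
  | succ n ih =>
    intro lo hi hfuel hlohi hhi hlo hhi2
    by_cases hlt : lo < hi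
    · rw [cdSearch_step p lo hi hlt]
      have hmidlt : (lo + hi) / 2 < p.length := by omega
      by_cases hm : p.getD ((lo + hi) / 2) 0 < 270
      · rw [if_pos hm]
        have hm' : p[(lo + hi) / 2] < 270 := by
          rwa [List.getD_eq_getElem p 0 hmidlt] at hm
        have hlo' : ∀ j : Nat, (hj : j < p.length) → j < (lo + hi) / 2 + 1 → p[j] < 270 := by
          intro j hj hjm
          exact lt_of_le_of_lt (hmono j ((lo + hi) / 2) (by omega) hmidlt) hm'
        have H := ih ((lo + hi) / 2 + 1) hi (by omega) (by omega) hhi hlo' hhi2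
        exact ⟨by omega, H.2.1, H.2.2.1, H.2.2.2⟩
      · rw [if_neg hm]
        have hm' : 270 ≤ p[(lo + hi) / 2] := by
          rw [List.getD_eq_getElem p 0 hmidlt] at hm; omega
        have hhi2' : ∀ j : Nat, (hj : j < p.length) → (lo + hi) / 2 ≤ j → 270 ≤ p[j] := by
          intro j hj hjm
          exact le_trans hm' (hmono ((lo + hi) / 2) j hjm hj)
        have H := ih lo ((lo + hi) / 2) (by omega) (by omega) (by omega) hlo hhi2'
        exact ⟨H.1, by omega, H.2.2.1, H.2.2.2⟩
    · rw [cdSearch_base p lo hi hlt]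
      exact ⟨le_rfl, by omega, hlo, fun h => hhi2 lo h (by omega)⟩

-- a first-crossing point is exactly findIdx
theorem findIdx_eq_of_first {p : List Int} {r : Nat} (hr : r ≤ p.length)
    (h1 : ∀ j : Nat, (hj : j < p.length) → j < r → p[j] < 270)
    (h2 : (h : r < p.length) → 270 ≤ p[r]) :
    p.findIdx (fun x => 270 ≤ x) = r := by
  set i := p.findIdx (fun x => 270 ≤ x) with hi
  rcases lt_trichotomy i r with hlt | heq | hgt
  · have hip : i < p.length := by omega
    have := List.findIdx_getElem (p := fun x => 270 ≤ x) (xs := p) (w := hip)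
    have h270 : 270 ≤ p[i] := by simpa using this
    exact absurd h270 (not_le.mpr (h1 i hip hlt))
  · exact heq
  · have hrp : r < p.length := by
      by_contra hc
      have : i ≤ p.length := List.findIdx_le_length
      omega
    have : ¬ (270 ≤ p[r]) := by
      have := List.not_of_lt_findIdx (p := fun x => 270 ≤ x) (xs := p) (i := r) (by omega)
      simpa using this
    exact absurd (h2 hrp) this

-- ===== VERDICT (by name: the statement is the Claim_ definition above) =====
theorem count_dishes_spec : Claim_equal_count_dishes := by
  intro dishes _
  have halt : count_dishes_alt dishes =
      (if cdSearch (cdPrefix dishes.toList 0) 0 (cdPrefix dishes.toList 0).length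
          < (cdPrefix dishes.toList 0).length
       then ((cdSearch (cdPrefix dishes.toList 0) 0 (cdPrefix dishes.toList 0).length : Nat) : Int) + 1
       else -1) := rfl
  unfold Spec_count_dishes count_dishes
  rw [halt, count_dishes_loop_eq dishes.toList 0 0]
  have hmono := cdPrefix_mono dishes.toList 0
  have hsearch := cdSearch_spec (cdPrefix dishes.toList 0) hmono
      (cdPrefix dishes.toList 0).length 0 (cdPrefix dishes.toList 0).length
      (by omega) (by omega) le_rfl
      (fun j hj hj0 => by omega) (fun j hj hjl => by omega)
  rw [findIdx_eq_of_first hsearch.2.1 hsearch.2.2.1 hsearch.2.2.2]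
  rcases lt_or_ge (cdSearch (cdPrefix dishes.toList 0) 0 (cdPrefix dishes.toList 0).length)
      (cdPrefix dishes.toList 0).length with h | h
  · rw [if_pos h, if_pos h]; ring
  · rw [if_neg (not_lt.mpr h), if_neg (not_lt.mpr h)]
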